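-- pv_equiv track=rewrite | github.com/jano31415/codejam | kickstart/k2022_e/probb.py | solve
-- ===== SOURCE A (Python) =====
-- def binary_search_leftmost(array, find_this_number):
--     left = 0
--     right = len(array)
--     while left < right:
--         middle = (left + right) // 2
--         if array[middle] > find_this_number:
--             right = middle
--         else:
--             left = middle + 1
--     return right - 1
--
-- def solve(n, students):
--     res=[""]*n
--     mentors = students[:]
--     mentors.sort()
--     for i,s in enumerate(students):
--         left = binary_search_leftmost(mentors, 2*s)
--         mentor_rating = mentors[left]
--         if mentor_rating == s:
--             if left != 0:
--                 mentor_rating = mentors[left-1]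
--             else:
--                 mentor_rating =-1
--
--         res[i] = str(mentor_rating)
--     return " ".join(res)
-- ===== SOURCE B (Python) =====
-- def solve(n, students):
--     res = [""] * n
--     mentors = sorted(students)
--     p = -1
--     for i in sorted(range(len(students)), key=lambda j: students[j]):
--         q = 2 * students[i]
--         while p + 1 < len(mentors) and mentors[p + 1] <= q:
--             p += 1
--         r = mentors[p]
--         if r == students[i]:
--             r = mentors[p - 1] if p != 0 else -1
--         res[i] = str(r)
--     return " ".join(res)
-- ===== Notes on version B (the rewrite author's own statement) =====
-- stated objective: alternative
-- what changed: Replaces the per-student binary search with a single monotone merge sweep: students are processed in sorted order while one pointer advances once across the sorted mentor list, and results are written back by original index.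
import Mathlib
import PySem

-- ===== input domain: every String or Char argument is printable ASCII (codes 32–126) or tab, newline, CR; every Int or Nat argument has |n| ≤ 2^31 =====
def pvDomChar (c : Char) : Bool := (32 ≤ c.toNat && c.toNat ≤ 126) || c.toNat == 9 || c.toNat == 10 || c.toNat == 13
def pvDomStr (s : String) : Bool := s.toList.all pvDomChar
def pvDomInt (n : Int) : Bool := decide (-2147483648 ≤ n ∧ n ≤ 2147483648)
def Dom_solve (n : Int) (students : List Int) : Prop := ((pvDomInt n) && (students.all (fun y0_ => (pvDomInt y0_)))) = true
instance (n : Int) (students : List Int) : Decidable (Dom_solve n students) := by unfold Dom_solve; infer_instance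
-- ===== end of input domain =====

-- Port A does n binary searches; port B replaces them by one monotone merge sweep over the
-- sorted mentor list (students processed in sorted order, results written back by original index).


-- ===== PORT A =====
-- the while-loop of binary_search_leftmost; array[middle] via pyGetD: middle is provably in
-- range whenever the loop body runs on a nonempty array (0 ≤ left ≤ middle < right ≤ len), so
-- the default is never read on inputs admitted by Pre_solve.
def bslGo (array : List Int) (x : Int) (left right : Int) : Int :=
  if h : left < right then
    let middle := PySem.Int.floordiv (left + right) 2
    if PySem.List.pyGetD array middle 0 > x then bslGo array x left middle
    else bslGo array x (middle + 1) right
  else right - 1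
termination_by (right - left).toNat
decreasing_by
  · have h2 := PySem.Int.floordiv_eq_ediv_of_pos (a := left + right) (b := 2) (by norm_num)
    simp only [h2]; omega
  · have h2 := PySem.Int.floordiv_eq_ediv_of_pos (a := left + right) (b := 2) (by norm_num)
    simp only [h2]; omega

def binary_search_leftmost (array : List Int) (find_this_number : Int) : Int :=
  bslGo array find_this_number 0 (array.length : Int)

-- mentors[left] / mentors[left-1] via pyGetD (Python's negative-index rule); res[i] = … via
-- pySetD.  On inputs admitted by Pre_solve every such access is in range, so the defaults are
-- never read and pySetD never drops a write (Python would raise exactly there).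
def solve (n : Int) (students : List Int) : String :=
  let res0 := List.replicate n.toNat ""
  let mentors := PySem.List.sorted students (fun x => x) false
  let res := (PySem.List.enumerate students).foldl (fun res is =>
      let left := binary_search_leftmost mentors (2 * is.2)
      let mr := PySem.List.pyGetD mentors left 0
      let mr := if mr == is.2 then (if left ≠ 0 then PySem.List.pyGetD mentors (left - 1) 0 else -1) else mr
      PySem.List.pySetD res is.1 (PySem.Int.toStr mr)) res0
  PySem.Str.join " " res

-- ===== PORT B =====
-- the inner 'while p + 1 < len(mentors) and mentors[p+1] <= q: p += 1' of B
def sweep (mentors : List Int) (q : Int) (p : Int) : Int :=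
  if h : p + 1 < (mentors.length : Int) ∧ PySem.List.pyGetD mentors (p + 1) 0 ≤ q then
    sweep mentors q (p + 1)
  else p
termination_by ((mentors.length : Int) - p).toNat
decreasing_by omega

-- sorted(range(len(students)), key=…) is ported with Nat indices (they are all nonnegative);
-- students[j] for such an index via getD (in range by construction).
def solve_alt (n : Int) (students : List Int) : String :=
  let res0 := List.replicate n.toNat ""
  let mentors := PySem.List.sorted students (fun x => x) false
  let order := PySem.List.sorted (List.range students.length) (fun j => students.getD j 0) false
  let st := order.foldl (fun (st : List String × Int) i =>
      let q := 2 * students.getD i 0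
      let p := sweep mentors q st.2
      let r := PySem.List.pyGetD mentors p 0
      let r := if r == students.getD i 0 then (if p ≠ 0 then PySem.List.pyGetD mentors (p - 1) 0 else -1) else r
      (st.1.set i (PySem.Int.toStr r), p)) (res0, -1)
  PySem.Str.join " " st.1

-- ===== PRECONDITION & SPEC =====
-- Pre_ excludes exactly the inputs on which the Python A raises: n smaller than len(students)
-- (res[i] = … raises IndexError), and a single negative student (left = -1 wraps to the lone
-- element, which equals the student, and mentors[-2] then raises IndexError).  Both Pythons
-- raise on all of these inputs.
def Pre_solve (n : Int) (students : List Int) : Prop :=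
  ((students.length : Int) ≤ n ∨ students = []) ∧ (students.length = 1 → 0 ≤ students.headI)
instance (n : Int) (students : List Int) : Decidable (Pre_solve n students) := by
  unfold Pre_solve; infer_instance

def pvWitness_solve : Int × List Int := (4, [2, 5, 1, 5])

def Spec_solve (n : Int) (students : List Int) (out : String) : Prop := out = solve_alt n students
instance (n : Int) (students : List Int) (out : String) : Decidable (Spec_solve n students out) := by
  unfold Spec_solve; infer_instance

-- ===== CLAIM (what is proved, stated in full; the proofs are below) =====
def Claim_equal_solve : Prop := ∀ (n : Int) (students : List Int), Dom_solve n students → Pre_solve n students → Spec_solve n students (solve n students)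

-- ===== LEMMAS AND PROOFS =====

-- number of mentors with rating ≤ q
def cnt (mentors : List Int) (q : Int) : Nat := mentors.countP (fun m => decide (m ≤ q))

-- the per-student final value, with the bisection point written as cnt - 1
def mval (mentors : List Int) (s : Int) : Int :=
  let left : Int := (cnt mentors (2 * s) : Int) - 1
  let r := PySem.List.pyGetD mentors left 0
  if r == s then (if left ≠ 0 then PySem.List.pyGetD mentors (left - 1) 0 else -1) else r

-- the canonical write both folds reduce to
def stepSet (students mentors : List Int) (r : List String) (i : Nat) : List String :=
  r.set i (PySem.Int.toStr (mval mentors (students.getD i 0)))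

theorem cnt_le_length (mentors : List Int) (q : Int) : cnt mentors q ≤ mentors.length :=
  List.countP_le_length

theorem cnt_mono (mentors : List Int) {q q' : Int} (h : q ≤ q') : cnt mentors q ≤ cnt mentors q' := by
  unfold cnt
  exact List.countP_mono_left (by intro a _ ha; simp_all; omega)

-- sorted prefix: indices below cnt hold values ≤ q
theorem getD_le_of_lt_cnt {mentors : List Int} (hp : mentors.Pairwise (· ≤ ·)) (q : Int) :
    ∀ i : Nat, i < mentors.length → i < cnt mentors q → mentors.getD i 0 ≤ q := by
  induction mentors with
  | nil => intro i hi; simp at hi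
  | cons h t ih =>
    rcases List.pairwise_cons.mp hp with ⟨hall, hpt⟩
    intro i hi hc
    by_cases hh : h ≤ q
    · cases i with
      | zero => simpa using hh
      | succ j =>
        have : j < cnt t q := by
          unfold cnt at hc ⊢; simp [hh] at hc; omega
        simpa using ih hpt j (by simpa using hi) this
    · exfalso
      have hz : cnt t q = 0 := by
        unfold cnt; rw [List.countP_eq_zero]
        intro a ha; simp; have := hall a ha; omega
      unfold cnt at hc
      simp [hh] at hc
      unfold cnt at hz; omega

-- sorted suffix: indices from cnt on hold values > q
theorem lt_getD_of_cnt_le {mentors : List Int} (hp : mentors.Pairwise (· ≤ ·)) (q : Int) :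
    ∀ i : Nat, i < mentors.length → cnt mentors q ≤ i → q < mentors.getD i 0 := by
  induction mentors with
  | nil => intro i hi; simp at hi
  | cons h t ih =>
    rcases List.pairwise_cons.mp hp with ⟨hall, hpt⟩
    intro i hi hc
    by_cases hh : h ≤ q
    · cases i with
      | zero =>
        exfalso; unfold cnt at hc; simp [hh] at hc
      | succ j =>
        have : cnt t q ≤ j := by
          unfold cnt at hc ⊢; simp [hh] at hc; omega
        simpa using ih hpt j (by simpa using hi) this
    · push Not at hh
      cases i with
      | zero => simpa using hh
      | succ j =>
        have hmem : t.getD j 0 ∈ t := by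
          rw [List.getD_eq_getElem t 0 (by simpa using hi)]
          exact List.getElem_mem _
        have := hall _ hmem
        simp only [List.getD_cons_succ]
        omega

-- classification pins the count
theorem cnt_eq_of_classified {mentors : List Int} (hp : mentors.Pairwise (· ≤ ·)) (q : Int)
    (k : Nat) (hk : k ≤ mentors.length)
    (hlo : ∀ i : Nat, i < k → mentors.getD i 0 ≤ q)
    (hhi : ∀ i : Nat, k ≤ i → i < mentors.length → q < mentors.getD i 0) :
    cnt mentors q = k := by
  rcases Nat.lt_trichotomy (cnt mentors q) k with h | h | h
  · exfalso
    have h1 := hlo (cnt mentors q) h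
    have h2 := lt_getD_of_cnt_le hp q (cnt mentors q) (by omega) (le_refl _)
    omega
  · exact h
  · exfalso
    have hkl : k < mentors.length := lt_of_lt_of_le h (cnt_le_length mentors q)
    have h1 := getD_le_of_lt_cnt hp q k hkl h
    have h2 := hhi k (le_refl _) hkl
    omega

-- the hand-written binary search computes cnt - 1 on a sorted array
theorem bslGo_eq {a : List Int} (hp : a.Pairwise (· ≤ ·)) (x : Int) :
    ∀ (k : Nat) (l r : Int), (r - l).toNat ≤ k → 0 ≤ l → r ≤ (a.length : Int) → l ≤ r →
    (∀ i : Nat, (i : Int) < l → a.getD i 0 ≤ x) →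
    (∀ i : Nat, r ≤ (i : Int) → i < a.length → x < a.getD i 0) →
    bslGo a x l r = (cnt a x : Int) - 1 := by
  intro k
  induction k with
  | zero =>
    intro l r hk h0 hr hle hlo hhi
    have hlr : ¬ l < r := by omega
    rw [bslGo, dif_neg hlr]
    have := cnt_eq_of_classified hp x r.toNat (by omega)
      (fun i hi => hlo i (by omega)) (fun i hi hil => hhi i (by omega) hil)
    omega
  | succ k ih =>
    intro l r hk h0 hr hle hlo hhi
    by_cases hlr : l < r
    · rw [bslGo, dif_pos hlr]
      have hmid := PySem.Int.floordiv_eq_ediv_of_pos (a := l + r) (b := 2) (by norm_num)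
      set m := PySem.Int.floordiv (l + r) 2 with hm
      have hm1 : l ≤ m := by omega
      have hm2 : m < r := by omega
      show (if PySem.List.pyGetD a m 0 > x then bslGo a x l m else bslGo a x (m + 1) r) = _
      have hget : PySem.List.pyGetD a m 0 = a.getD m.toNat 0 :=
        PySem.List.pyGetD_of_nonneg a 0 (by omega)
      by_cases hgt : PySem.List.pyGetD a m 0 > x
      · rw [if_pos hgt]
        rw [hget] at hgt
        refine ih l m (by omega) h0 (by omega) (by omega) hlo ?_
        intro i hi hilen
        have hmono : a.getD m.toNat 0 ≤ a.getD i 0 := by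
          rcases Nat.eq_or_lt_of_le (show m.toNat ≤ i by omega) with he | hlt
          · rw [he]
          · rw [List.getD_eq_getElem a 0 (by omega), List.getD_eq_getElem a 0 hilen]
            exact List.pairwise_iff_getElem.mp hp m.toNat i (by omega) hilen hlt
        omega
      · rw [if_neg hgt]
        rw [hget] at hgt
        push Not at hgt
        refine ih (m + 1) r (by omega) (by omega) hr (by omega) ?_ hhi
        intro i hi
        have hmono : a.getD i 0 ≤ a.getD m.toNat 0 := by
          rcases Nat.eq_or_lt_of_le (show i ≤ m.toNat by omega) with he | hlt
          · rw [he]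
          · rw [List.getD_eq_getElem a 0 (by omega), List.getD_eq_getElem a 0 (by omega)]
            exact List.pairwise_iff_getElem.mp hp i m.toNat (by omega) (by omega) hlt
        omega
    · rw [bslGo, dif_neg hlr]
      have := cnt_eq_of_classified hp x r.toNat (by omega)
        (fun i hi => hlo i (by omega)) (fun i hi hil => hhi i (by omega) hil)
      omega

theorem binary_search_leftmost_eq {a : List Int} (hp : a.Pairwise (· ≤ ·)) (x : Int) :
    binary_search_leftmost a x = (cnt a x : Int) - 1 := by
  unfold binary_search_leftmost
  exact bslGo_eq hp x ((a.length : Int) - 0).toNat 0 (a.length : Int) (le_refl _) (by omega)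
    (le_refl _) (by omega) (by intro i hi; omega) (by intro i hi hil; exfalso; omega)

-- the sweep pointer lands on cnt - 1
theorem sweep_eq {mentors : List Int} (hp : mentors.Pairwise (· ≤ ·)) (q : Int) :
    ∀ (k : Nat) (p : Int), ((mentors.length : Int) - p).toNat ≤ k → -1 ≤ p →
      p ≤ (cnt mentors q : Int) - 1 → sweep mentors q p = (cnt mentors q : Int) - 1 := by
  intro k
  induction k with
  | zero =>
    intro p hk h1 h2
    exfalso
    have := cnt_le_length mentors q
    omega
  | succ k ih =>
    intro p hk h1 h2
    by_cases hcond : p + 1 < (mentors.length : Int) ∧ PySem.List.pyGetD mentors (p + 1) 0 ≤ q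
    · rw [sweep, dif_pos hcond]
      have hget : PySem.List.pyGetD mentors (p + 1) 0 = mentors.getD (p + 1).toNat 0 :=
        PySem.List.pyGetD_of_nonneg mentors 0 (by omega)
      have hlt : p + 1 ≤ (cnt mentors q : Int) - 1 := by
        by_contra hno
        have hge : cnt mentors q ≤ (p + 1).toNat := by omega
        have := lt_getD_of_cnt_le hp q (p + 1).toNat (by omega) hge
        have h3 := hcond.2
        rw [hget] at h3
        omega
      exact ih (p + 1) (by omega) (by omega) hlt
    · rw [sweep, dif_neg hcond]
      rcases Int.lt_or_le p ((cnt mentors q : Int) - 1) with hlt | hge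
      · exfalso
        have hc := cnt_le_length mentors q
        have hin : p + 1 < (mentors.length : Int) := by omega
        have h4 := getD_le_of_lt_cnt hp q (p + 1).toNat (by omega) (by omega)
        have hget : PySem.List.pyGetD mentors (p + 1) 0 = mentors.getD (p + 1).toNat 0 :=
          PySem.List.pyGetD_of_nonneg mentors 0 (by omega)
        exact hcond ⟨hin, by rw [hget]; exact h4⟩
      · omega

-- writing position-determined values: the fold of set is pointwise, whatever the order
theorem setfold_getElem? (students mentors : List Int) :
    ∀ (L : List Nat) (r0 : List String) (j : Nat),
      (L.foldl (stepSet students mentors) r0)[j]? =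
        if j ∈ L ∧ j < r0.length then some (PySem.Int.toStr (mval mentors (students.getD j 0)))
        else r0[j]? := by
  intro L
  induction L with
  | nil => intro r0 j; simp
  | cons i L ih =>
    intro r0 j
    rw [List.foldl_cons, ih]
    simp only [stepSet, List.length_set, List.mem_cons, List.getElem?_set]
    by_cases hl : j < r0.length
    · by_cases hj : j ∈ L
      · simp [hj, hl]
      · by_cases hij : j = i
        · subst hij; simp [hj, hl]
        · simp [hj, hl, hij, Ne.symm hij]
    · have hn : r0[j]? = none := List.getElem?_eq_none (by omega)
      by_cases hj : j ∈ L <;> by_cases hij : j = i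
      · subst hij; simp [hj, hl]
      · simp [hj, hl]; intro he; omega
      · subst hij; simp [hj, hl]
      · simp [hj, hl, hij, Ne.symm hij]

-- A's loop is the canonical set-fold over range(len(students))
theorem solveA_res (n : Int) (students : List Int) :
    solve n students =
      PySem.Str.join " "
        ((List.range students.length).foldl
          (stepSet students (PySem.List.sorted students (fun x => x) false))
          (List.replicate n.toNat "")) := by
  unfold solve
  refine congrArg (PySem.Str.join " ") ?_
  rw [PySem.List.enumerate_eq_map_pyRange students 0, PySem.List.len_eq,
    PySem.List.pyRange_zero_natCast, List.foldl_map, List.foldl_map]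
  refine PySem.List.foldl_congr_mem _ _ _ _ ?_
  intro acc k hk
  have hp : (PySem.List.sorted students (fun x => x) false).Pairwise (· ≤ ·) :=
    PySem.List.sorted_pairwise students (fun x => x)
  simp only [PySem.List.pyGetD_natCast, PySem.List.pySetD_natCast,
    binary_search_leftmost_eq hp, stepSet, mval]

-- B's loop is the canonical set-fold over the sorted index order
theorem solveB_fold (students mentors : List Int) (hp : mentors.Pairwise (· ≤ ·)) :
    ∀ (L : List Nat) (r0 : List String) (p0 : Int),
      L.Pairwise (fun a b => students.getD a 0 ≤ students.getD b 0) →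
      -1 ≤ p0 →
      (∀ i ∈ L, p0 ≤ (cnt mentors (2 * students.getD i 0) : Int) - 1) →
      (L.foldl (fun (st : List String × Int) i =>
        let q := 2 * students.getD i 0
        let p := sweep mentors q st.2
        let r := PySem.List.pyGetD mentors p 0
        let r := if r == students.getD i 0 then (if p ≠ 0 then PySem.List.pyGetD mentors (p - 1) 0 else -1) else r
        (st.1.set i (PySem.Int.toStr r), p)) (r0, p0)).1 =
      L.foldl (stepSet students mentors) r0 := by
  intro L
  induction L with
  | nil => intro r0 p0 _ _ _; rfl
  | cons i L ih =>
    intro r0 p0 hpw h1 h2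
    rcases List.pairwise_cons.mp hpw with ⟨hall, hpt⟩
    have hs := sweep_eq hp (2 * students.getD i 0)
      (((mentors.length : Int) - p0).toNat) p0 (le_refl _) h1 (h2 i List.mem_cons_self)
    simp only [List.foldl_cons]
    rw [hs]
    have htail : ∀ j ∈ L, (cnt mentors (2 * students.getD i 0) : Int) - 1 ≤
        (cnt mentors (2 * students.getD j 0) : Int) - 1 := by
      intro j hj
      have hkey := hall j hj
      have := cnt_mono mentors (q := 2 * students.getD i 0) (q' := 2 * students.getD j 0) (by omega)
      omega
    have hnn : (0 : Int) ≤ (cnt mentors (2 * students.getD i 0) : Int) := Int.natCast_nonneg _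
    exact ih _ _ hpt (by omega) htail

-- ===== VERDICT (by name: the statement is the Claim_ definition above) =====
theorem solve_spec : Claim_equal_solve := by
  intro n students _ _
  unfold Spec_solve
  rw [solveA_res]
  have hp : (PySem.List.sorted students (fun x => x) false).Pairwise (· ≤ ·) :=
    PySem.List.sorted_pairwise students (fun x => x)
  have hB : solve_alt n students =
      PySem.Str.join " "
        ((PySem.List.sorted (List.range students.length) (fun j => students.getD j 0) false).foldl
          (stepSet students (PySem.List.sorted students (fun x => x) false))
          (List.replicate n.toNat "")) := by
    unfold solve_alt
    refine congrArg (PySem.Str.join " ") ?_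
    exact solveB_fold students _ hp _ _ (-1)
      (PySem.List.sorted_pairwise (List.range students.length) (fun j => students.getD j 0))
      (by omega)
      (by intro i _; have := Int.natCast_nonneg (cnt (PySem.List.sorted students (fun x => x) false) (2 * students.getD i 0)); omega)
  rw [hB]
  congr 1
  apply List.ext_getElem?
  intro j
  rw [setfold_getElem?, setfold_getElem?]
  have hmem : j ∈ PySem.List.sorted (List.range students.length) (fun j => students.getD j 0) false ↔
      j ∈ List.range students.length :=
    PySem.List.mem_sorted (List.range students.length) (fun j => students.getD j 0) false j
  by_cases h : j ∈ List.range students.length ∧ j < (List.replicate n.toNat "").length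
  · rw [if_pos h, if_pos ⟨hmem.mpr h.1, h.2⟩]
  · rw [if_neg h, if_neg (by rw [hmem]; exact h)]
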